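-- pv_equiv track=rewrite | github.com/jjliewie/Competitive-Programming | USACO/2020/FEB BRONZE/mad-scientist.py | mad_scientist
-- ===== SOURCE A (Python) =====
-- def flip(a, b, k):
--     for i in range(a, b+1):
--         if k[i] == "H":
--             k = k[:i] + "G" + k[i+1:]
--         else:
--             k = k[:i] + "H" + k[i+1:]
--     return k
--
-- def mad_scientist(n, k):
--     cnt = 0
--     start, end = -1, -1
--     for i in range(len(k)):
--         if k[i] == n[i]:
--             if end > -1:
--                 k = flip(start, end, k)
--                 cnt += 1
--             end = -1
--             start = -1
--         else:
--             if start == -1: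
--                 start = i
--                 end = i
--             else:
--                 end = i
--     return cnt
-- ===== SOURCE B (Python) =====
-- def mad_scientist(n, k):
--     # Single O(len) pass: count mismatch runs that end at a matching position.
--     # The flip mutation in A never affects later comparisons, so it is dropped.
--     cnt = 0
--     run = False
--     for a, b in zip(n, k):
--         if a != b:
--             run = True
--         elif run:
--             cnt += 1
--             run = False
--     return cnt
-- ===== Notes on version B (the rewrite author's own statement) =====
-- stated objective: faster
-- what changed: Replaces the quadratic index loop with string-rebuilding flip calls by a single linear pass over zip(n,k) that tracks whether a mismatch run is open and counts it when a match closes it; the flip mutation never influences later comparisons, so it is dropped.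
import Mathlib
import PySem

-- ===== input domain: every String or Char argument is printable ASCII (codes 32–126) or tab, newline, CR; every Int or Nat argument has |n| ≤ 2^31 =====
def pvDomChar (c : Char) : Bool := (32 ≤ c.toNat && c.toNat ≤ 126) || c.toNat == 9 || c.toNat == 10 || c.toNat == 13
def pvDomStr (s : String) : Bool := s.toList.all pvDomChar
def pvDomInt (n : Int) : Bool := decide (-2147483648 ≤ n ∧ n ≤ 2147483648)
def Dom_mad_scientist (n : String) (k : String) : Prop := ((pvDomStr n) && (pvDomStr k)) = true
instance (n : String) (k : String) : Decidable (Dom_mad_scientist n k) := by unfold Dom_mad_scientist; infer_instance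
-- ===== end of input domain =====

-- B replaces A's quadratic index loop with flip mutations by one linear pass counting
-- mismatch runs closed by a match (objective: faster, asymptotic).

-- ===== PORT A =====
-- flip(a, b, k): rebuild k with positions a..b toggled H<->G (one slice-rebuild per index)
def pvFlip (a : Int) (b : Int) (k : List Char) : List Char :=
  (PySem.List.pyRange a (b + 1) 1).foldl (fun k i =>
    match PySem.List.pyGet? k i with
    | some c =>
        if c = 'H'
        then PySem.List.slice k none (some i) ++ ['G'] ++ PySem.List.slice k (some (i + 1)) none
        else PySem.List.slice k none (some i) ++ ['H'] ++ PySem.List.slice k (some (i + 1)) none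
    | none => k) k   -- Python would raise IndexError; unreachable in A's calls

-- one iteration of A's main loop (state: cnt, start, end, k)
def pvMadStep (nl : List Char) (st : Int × Int × Int × List Char) (i : Int) :
    Int × Int × Int × List Char :=
  match PySem.List.pyGet? st.2.2.2 i, PySem.List.pyGet? nl i with
  | some kc, some nc =>
      if kc = nc then
        if st.2.2.1 > -1 then (st.1 + 1, -1, -1, pvFlip st.2.1 st.2.2.1 st.2.2.2)
        else (st.1, -1, -1, st.2.2.2)
      else
        if st.2.1 = -1 then (st.1, i, i, st.2.2.2)
        else (st.1, st.2.1, i, st.2.2.2)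
  | _, _ => st   -- Python raises IndexError here (n shorter than k); excluded by Pre_

def mad_scientist (n : String) (k : String) : Int :=
  ((PySem.List.pyRange 0 (k.toList.length) 1).foldl (pvMadStep n.toList)
    (0, -1, -1, k.toList)).1

-- ===== PORT B =====
def pvAltStep (st : Int × Bool) (p : Char × Char) : Int × Bool :=
  if p.1 ≠ p.2 then (st.1, true)
  else if st.2 then (st.1 + 1, false) else st

def mad_scientist_alt (n : String) (k : String) : Int :=
  ((n.toList.zip k.toList).foldl pvAltStep (0, false)).1

-- ===== PRECONDITION & SPEC =====
-- Pre_ excludes exactly the inputs where A raises IndexError (n shorter than k).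
def Pre_mad_scientist (n : String) (k : String) : Prop :=
  k.toList.length ≤ n.toList.length
instance (n : String) (k : String) : Decidable (Pre_mad_scientist n k) := by
  unfold Pre_mad_scientist; infer_instance
def pvWitness_mad_scientist : String × String := ("HHGG", "HGG")

def Spec_mad_scientist (n : String) (k : String) (out : Int) : Prop := out = mad_scientist_alt n k
instance (n : String) (k : String) (out : Int) : Decidable (Spec_mad_scientist n k out) := by unfold Spec_mad_scientist; infer_instance

-- ===== CLAIM (what is proved, stated in full; the proofs are below) =====
def Claim_equal_mad_scientist : Prop := ∀ (n : String) (k : String), Dom_mad_scientist n k → Pre_mad_scientist n k → Spec_mad_scientist n k (mad_scientist n k)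
-- ===== LEMMAS AND PROOFS =====

-- one slice-rebuild is List.set
lemma pvSet_eq_set (k : List Char) (i : Nat) (c : Char) (h : i < k.length) :
    PySem.List.slice k none (some (i : Int)) ++ [c] ++
      PySem.List.slice k (some ((i : Int) + 1)) none = k.set i c := by
  have h1 : ((i : Int) + 1) = ((i + 1 : Nat) : Int) := by push_cast; ring
  rw [PySem.List.slice_to_natCast, h1, PySem.List.slice_from_natCast,
    List.set_eq_take_cons_drop c h]
  simp

-- pvFlip over indices all ≤ b keeps the length and all positions > b
lemma pvFlip_fold_inv (b : Int) (is : List Int)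
    (hmem : ∀ i ∈ is, 0 ≤ i ∧ i ≤ b) (k : List Char) :
    (is.foldl (fun k i =>
      match PySem.List.pyGet? k i with
      | some c =>
          if c = 'H'
          then PySem.List.slice k none (some i) ++ ['G'] ++ PySem.List.slice k (some (i + 1)) none
          else PySem.List.slice k none (some i) ++ ['H'] ++ PySem.List.slice k (some (i + 1)) none
      | none => k) k).length = k.length ∧
    ∀ m : Nat, b < (m : Int) →
      (is.foldl (fun k i =>
        match PySem.List.pyGet? k i with
        | some c =>
            if c = 'H'
            then PySem.List.slice k none (some i) ++ ['G'] ++ PySem.List.slice k (some (i + 1)) none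
            else PySem.List.slice k none (some i) ++ ['H'] ++ PySem.List.slice k (some (i + 1)) none
        | none => k) k)[m]? = k[m]? := by
  induction is generalizing k with
  | nil => simp
  | cons i is ih =>
    obtain ⟨hi0, hib⟩ := hmem i (List.mem_cons_self ..)
    have hmem' : ∀ j ∈ is, 0 ≤ j ∧ j ≤ b := fun j hj => hmem j (List.mem_cons_of_mem _ hj)
    simp only [List.foldl_cons]
    rcases hg : PySem.List.pyGet? k i with _ | c
    · simpa [hg] using ih hmem' k
    · -- i is a valid index: rewrite via its Nat form
      have hinat : i = ((i.toNat : Nat) : Int) := by omega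
      have hrange : PySem.Raise.InRange k.length i := by
        by_contra hc
        rw [(PySem.List.pyGet?_eq_none_iff k i).2 hc] at hg; cases hg
      have hlt : i.toNat < k.length := by
        unfold PySem.Raise.InRange at hrange; omega
      have key : ∀ c' : Char,
          (PySem.List.slice k none (some i) ++ [c'] ++
            PySem.List.slice k (some (i + 1)) none).length = k.length ∧
          ∀ m : Nat, b < (m : Int) →
            (PySem.List.slice k none (some i) ++ [c'] ++
              PySem.List.slice k (some (i + 1)) none)[m]? = k[m]? := by
        intro c'
        rw [hinat, pvSet_eq_set k i.toNat c' hlt]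
        refine ⟨List.length_set, fun m hm => List.getElem?_set_ne (by omega)⟩
      rcases hco : decide (c = 'H') with _ | _
      · have hcne : ¬ c = 'H' := by simpa using hco
        simp only [hcne, if_false]
        obtain ⟨hl, hget⟩ := ih hmem' (PySem.List.slice k none (some i) ++ ['H'] ++
          PySem.List.slice k (some (i + 1)) none)
        exact ⟨hl.trans (key 'H').1, fun m hm => (hget m hm).trans ((key 'H').2 m hm)⟩
      · have hceq : c = 'H' := by simpa using hco
        simp only [hceq, if_true]
        obtain ⟨hl, hget⟩ := ih hmem' (PySem.List.slice k none (some i) ++ ['G'] ++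
          PySem.List.slice k (some (i + 1)) none)
        exact ⟨hl.trans (key 'G').1, fun m hm => (hget m hm).trans ((key 'G').2 m hm)⟩

lemma pvFlip_inv (a b : Int) (k : List Char) (ha : 0 ≤ a) :
    (pvFlip a b k).length = k.length ∧
    ∀ m : Nat, b < (m : Int) → (pvFlip a b k)[m]? = k[m]? := by
  unfold pvFlip
  apply pvFlip_fold_inv
  intro i hi
  rw [PySem.List.mem_pyRange_one] at hi
  omega

-- B's fold is additive in the count component
lemma pvAlt_add (l : List (Char × Char)) (c : Int) (r : Bool) :
    (l.foldl pvAltStep (c, r)).1 = c + (l.foldl pvAltStep (0, r)).1 := by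
  induction l generalizing c r with
  | nil => simp
  | cons p l ih =>
    rw [List.foldl_cons, List.foldl_cons]
    by_cases h1 : p.1 ≠ p.2
    · rw [show pvAltStep (c, r) p = (c, true) from by simp [pvAltStep, h1],
        show pvAltStep (0, r) p = (0, true) from by simp [pvAltStep, h1],
        ih c true, ih 0 true]
    · cases r
      · rw [show pvAltStep (c, false) p = (c, false) from by simp [pvAltStep, h1],
          show pvAltStep ((0 : Int), false) p = (0, false) from by simp [pvAltStep, h1],
          ih c false, ih 0 false]
      · rw [show pvAltStep (c, true) p = (c + 1, false) from by simp [pvAltStep, h1],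
          show pvAltStep ((0 : Int), true) p = (0 + 1, false) from by simp [pvAltStep, h1],
          ih (c + 1) false, ih (0 + 1) false]
        ring

-- main invariant: A's loop from index i equals cnt plus B's pass over the suffixes
lemma pvMain (nl kl : List Char) (hlen : kl.length ≤ nl.length) :
    ∀ (d i : Nat), i + d = kl.length →
    ∀ (cnt s e : Int) (k : List Char),
      k.length = kl.length →
      (∀ m : Nat, i ≤ m → k[m]? = kl[m]?) →
      ((0 ≤ s ∧ s ≤ e ∧ e < (i : Int)) ∨ (s = -1 ∧ e = -1)) →
      ((PySem.List.pyRange (i : Int) (kl.length : Int) 1).foldl (pvMadStep nl)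
        (cnt, s, e, k)).1
        = cnt + (((nl.drop i).zip (kl.drop i)).foldl pvAltStep (0, decide (e > -1))).1 := by
  intro d
  induction d with
  | zero =>
    intro i hi cnt s e k _ _ _
    have h1 : PySem.List.pyRange (i : Int) (kl.length : Int) 1 = [] := by
      apply List.eq_nil_of_length_eq_zero
      rw [PySem.List.length_pyRange_one]; omega
    have h2 : kl.drop i = [] := by
      apply List.eq_nil_of_length_eq_zero; simp; omega
    simp [h1, h2]
  | succ d ih =>
    intro i hi cnt s e k hk hagree hinv
    have hik : i < kl.length := by omega
    have hin : i < nl.length := by omega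
    have hcons : PySem.List.pyRange (i : Int) (kl.length : Int) 1
        = (i : Int) :: PySem.List.pyRange ((i : Int) + 1) (kl.length : Int) 1 :=
      PySem.List.pyRange_one_cons (by exact_mod_cast hik)
    have hgk : PySem.List.pyGet? k (i : Int) = some kl[i] := by
      rw [PySem.List.pyGet?_natCast, hagree i le_rfl, List.getElem?_eq_getElem hik]
    have hgn : PySem.List.pyGet? nl (i : Int) = some nl[i] := by
      rw [PySem.List.pyGet?_natCast, List.getElem?_eq_getElem hin]
    have hdropn : nl.drop i = nl[i] :: nl.drop (i + 1) := List.drop_eq_getElem_cons hin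
    have hdropk : kl.drop i = kl[i] :: kl.drop (i + 1) := List.drop_eq_getElem_cons hik
    have hicast : (i : Int) + 1 = ((i + 1 : Nat) : Int) := by push_cast; ring
    rw [hcons, List.foldl_cons]
    by_cases heq : kl[i] = nl[i]
    · by_cases hrun : e > -1
      · -- match closing an open run: A flips and counts, B counts
        have hse : 0 ≤ s ∧ s ≤ e ∧ e < (i : Int) := by
          rcases hinv with h | h
          · exact h
          · omega
        have step : pvMadStep nl (cnt, s, e, k) (i : Int)
            = (cnt + 1, -1, -1, pvFlip s e k) := by
          unfold pvMadStep; rw [hgk, hgn]; simp [heq, hrun]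
        obtain ⟨hfl, hfg⟩ := pvFlip_inv s e k hse.1
        rw [step, hicast, ih (i + 1) (by omega) (cnt + 1) (-1) (-1) (pvFlip s e k)
          (hfl.trans hk)
          (fun m hm => (hfg m (by omega)).trans (hagree m (by omega)))
          (Or.inr ⟨rfl, rfl⟩)]
        rw [hdropn, hdropk, List.zip_cons_cons, List.foldl_cons]
        have hbstep : pvAltStep (0, decide (e > -1)) (nl[i], kl[i]) = (1, false) := by
          unfold pvAltStep; simp [heq, hrun]
        rw [hbstep]
        have : decide (e > -1) = true := by simp [hrun]
        simp only [this] at *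
        rw [pvAlt_add _ 1 false]
        have : decide ((-1 : Int) > -1) = false := by decide
        rw [this]; ring
      · -- match with no open run
        have he : e = -1 := by
          rcases hinv with h | h
          · omega
          · exact h.2
        have step : pvMadStep nl (cnt, s, e, k) (i : Int) = (cnt, -1, -1, k) := by
          unfold pvMadStep; rw [hgk, hgn]; simp [heq, hrun]
        rw [step, hicast, ih (i + 1) (by omega) cnt (-1) (-1) k hk
          (fun m hm => hagree m (by omega)) (Or.inr ⟨rfl, rfl⟩)]
        rw [hdropn, hdropk, List.zip_cons_cons, List.foldl_cons]
        have hbstep : pvAltStep (0, decide (e > -1)) (nl[i], kl[i])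
            = (0, decide ((-1 : Int) > -1)) := by
          unfold pvAltStep; simp [heq, he]
        rw [hbstep]
    · -- mismatch: run opens or continues
      have hrun' : decide ((i : Int) > -1) = true := by simp; omega
      by_cases hs : s = -1
      · have step : pvMadStep nl (cnt, s, e, k) (i : Int) = (cnt, (i : Int), (i : Int), k) := by
          unfold pvMadStep; rw [hgk, hgn]; simp [heq, hs]
        rw [step, hicast, ih (i + 1) (by omega) cnt (i : Int) (i : Int) k hk
          (fun m hm => hagree m (by omega)) (Or.inl ⟨by omega, le_rfl, by omega⟩)]
        rw [hdropn, hdropk, List.zip_cons_cons, List.foldl_cons]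
        have heq' : nl[i] ≠ kl[i] := fun h => heq h.symm
        have hbstep : pvAltStep (0, decide (e > -1)) (nl[i], kl[i]) = (0, true) := by
          unfold pvAltStep; simp [heq']
        rw [hbstep, hrun']
      · have hse : 0 ≤ s ∧ s ≤ e ∧ e < (i : Int) := by
          rcases hinv with h | h
          · exact h
          · exact absurd h.1 hs
        have step : pvMadStep nl (cnt, s, e, k) (i : Int) = (cnt, s, (i : Int), k) := by
          unfold pvMadStep; rw [hgk, hgn]; simp [heq, hs]
        rw [step, hicast, ih (i + 1) (by omega) cnt s (i : Int) k hk
          (fun m hm => hagree m (by omega)) (Or.inl ⟨hse.1, by omega, by omega⟩)]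
        rw [hdropn, hdropk, List.zip_cons_cons, List.foldl_cons]
        have heq' : nl[i] ≠ kl[i] := fun h => heq h.symm
        have hbstep : pvAltStep (0, decide (e > -1)) (nl[i], kl[i]) = (0, true) := by
          unfold pvAltStep; simp [heq']
        rw [hbstep, hrun']

-- ===== VERDICT (by name: the statement is the Claim_ definition above) =====
theorem mad_scientist_spec : Claim_equal_mad_scientist := by
  intro n k _ hpre
  unfold Spec_mad_scientist mad_scientist mad_scientist_alt
  have h := pvMain n.toList k.toList hpre k.toList.length 0 (by omega)
    0 (-1) (-1) k.toList rfl (fun m _ => rfl) (Or.inr ⟨rfl, rfl⟩)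
  simp only [Nat.cast_zero, List.drop_zero] at h
  rw [h]
  have : decide ((-1 : Int) > -1) = false := by decide
  rw [this]; ring
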